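-- pv_equiv track=rewrite | github.com/YijenChan/magneto | scripts/infer_suspicious_nodes.py | merge_overlapping_subchains
-- ===== SOURCE A (Python) =====
-- from typing import Dict, List, Tuple, Any, Set
--
-- def merge_overlapping_subchains(subchains: List[List[str]]) -> List[List[str]]:
--     merged: List[Set[str]] = []
--
--     for chain in subchains:
--         cset = set(chain)
--         found = False
--         for existing in merged:
--             if len(existing.intersection(cset)) >= max(1, min(len(existing), len(cset)) // 2):
--                 existing.update(cset)
--                 found = True
--                 break
--         if not found:
--             merged.append(set(cset))
--
--     out = [sorted(list(s)) for s in merged]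
--     out.sort(key=lambda x: (len(x), x))
--     return out
-- ===== SOURCE B (Python) =====
-- from typing import List
--
-- def merge_overlapping_subchains(subchains: List[List[str]]) -> List[List[str]]:
--     # Inverted index element -> ids of merged sets containing it; per chain,
--     # only the sets sharing at least one node (the postings' union) are scanned,
--     # in ascending id order, instead of every merged set.
--     merged = []            # list of sets of nodes
--     index = {}             # node -> list of set ids whose set contains it
--     for chain in subchains:
--         cs = set(chain)
--         cand = set()
--         for e in cs:
--             cand.update(index.get(e, ()))
--         target = None
--         for i in sorted(cand):
--             s = merged[i]
--             if len(s & cs) >= max(1, min(len(s), len(cs)) // 2):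
--                 target = i
--                 break
--         if target is None:
--             target = len(merged)
--             merged.append(set())
--         s = merged[target]
--         for e in cs:
--             if e not in s:
--                 s.add(e)
--                 index.setdefault(e, []).append(target)
--     out = [sorted(s) for s in merged]
--     out.sort(key=lambda x: (len(x), x))
--     return out
-- ===== Notes on version B (the rewrite author's own statement) =====
-- stated objective: alternative
-- what changed: B maintains an inverted index (node -> ids of merged clusters containing it) so each chain is tested only against the clusters sharing at least one node with it, in ascending id order, instead of linearly scanning every merged cluster; it trades A's full scan for index maintenance, which pays off only when many clusters are disjoint.
import Mathlib
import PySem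

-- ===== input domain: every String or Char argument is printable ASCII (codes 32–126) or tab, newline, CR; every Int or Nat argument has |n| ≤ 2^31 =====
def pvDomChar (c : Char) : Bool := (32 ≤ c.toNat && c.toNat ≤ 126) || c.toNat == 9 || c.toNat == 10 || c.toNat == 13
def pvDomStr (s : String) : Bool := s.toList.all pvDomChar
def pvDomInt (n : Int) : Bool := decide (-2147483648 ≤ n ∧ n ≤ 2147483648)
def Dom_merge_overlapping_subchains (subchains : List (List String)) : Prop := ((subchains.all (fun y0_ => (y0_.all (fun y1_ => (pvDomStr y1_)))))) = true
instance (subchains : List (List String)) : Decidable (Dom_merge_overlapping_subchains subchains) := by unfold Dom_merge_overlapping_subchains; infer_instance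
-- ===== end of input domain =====

-- B replaces A's linear scan of all merged clusters per chain by an inverted index
-- (node -> ids of clusters containing it), so only clusters sharing a node are tested.
-- Set lengths are Nat, so Python's `// 2` on them is Nat division here (exact).

-- ===== PORT A =====
-- inner `for existing in merged: … break` loop: first cluster whose overlap meets
-- the threshold is replaced by its union with cset; none = no match
def pvMergeFirst (cs : PySem.Set String) : List (PySem.Set String) → Option (List (PySem.Set String))
  | [] => none
  | s :: rest =>
    if max 1 (min s.length cs.length / 2) ≤ (PySem.Set.inter s cs).length then
      some (PySem.Set.update s cs :: rest)
    else (pvMergeFirst cs rest).map (fun m => s :: m)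

-- body of A's `for chain in subchains` loop
def pvStepA (merged : List (PySem.Set String)) (chain : List String) : List (PySem.Set String) :=
  let cset := PySem.Set.ofList chain
  match pvMergeFirst cset merged with
  | some m => m
  | none => merged ++ [cset]

def merge_overlapping_subchains (subchains : List (List String)) : List (List String) :=
  let merged := subchains.foldl pvStepA []
  let out := merged.map (fun s => PySem.List.sorted s (fun x => x) false)
  PySem.List.sorted2 out (fun x => (x.length : Int)) (fun x => x) false

-- ===== PORT B =====
-- `for i in sorted(cand): … break`: first candidate id meeting the threshold
def pvMatchIn (cs : PySem.Set String) (merged : List (PySem.Set String)) : List Nat → Option Nat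
  | [] => none
  | i :: rest =>
    let s := merged.getD i PySem.Set.empty
    if max 1 (min s.length cs.length / 2) ≤ (PySem.Set.inter s cs).length then some i
    else pvMatchIn cs merged rest

-- body of B's `for e in cs: if e not in s: s.add(e); index.setdefault(e, []).append(target)`
def pvAbsorbF (i : Nat) (p : PySem.Set String × PySem.Dict String (List Nat)) (e : String) :
    PySem.Set String × PySem.Dict String (List Nat) :=
  if PySem.Set.contains p.1 e then p
  else (p.1 ++ [e], p.2.insert e (p.2.getD e [] ++ [i]))

def pvAbsorb (cs : PySem.Set String) (i : Nat) (s : PySem.Set String)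
    (idx : PySem.Dict String (List Nat)) : PySem.Set String × PySem.Dict String (List Nat) :=
  cs.foldl (pvAbsorbF i) (s, idx)

-- body of B's `for chain in subchains` loop; state = (merged clusters, inverted index)
def pvStepB (st : List (PySem.Set String) × PySem.Dict String (List Nat)) (chain : List String) :
    List (PySem.Set String) × PySem.Dict String (List Nat) :=
  let cs := PySem.Set.ofList chain
  let cand : PySem.Set Nat := cs.foldl (fun c e => PySem.Set.update c (st.2.getD e [])) PySem.Set.empty
  match pvMatchIn cs st.1 (PySem.List.sorted cand (fun x => x) false) with
  | some i =>
      let r := pvAbsorb cs i (st.1.getD i PySem.Set.empty) st.2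
      (st.1.set i r.1, r.2)
  | none =>
      let r := pvAbsorb cs st.1.length PySem.Set.empty st.2
      (st.1 ++ [r.1], r.2)

def merge_overlapping_subchains_alt (subchains : List (List String)) : List (List String) :=
  let st := subchains.foldl pvStepB ([], PySem.Dict.empty)
  let out := st.1.map (fun s => PySem.List.sorted s (fun x => x) false)
  PySem.List.sorted2 out (fun x => (x.length : Int)) (fun x => x) false

-- ===== PRECONDITION & SPEC =====
def Spec_merge_overlapping_subchains (subchains : List (List String)) (out : List (List String)) : Prop := out = merge_overlapping_subchains_alt subchains
instance (subchains : List (List String)) (out : List (List String)) : Decidable (Spec_merge_overlapping_subchains subchains out) := by unfold Spec_merge_overlapping_subchains; infer_instance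

-- ===== CLAIM (what is proved, stated in full; the proofs are below) =====
def Claim_equal_merge_overlapping_subchains : Prop := ∀ (subchains : List (List String)), Dom_merge_overlapping_subchains subchains → Spec_merge_overlapping_subchains subchains (merge_overlapping_subchains subchains)

-- ===== LEMMAS AND PROOFS =====

-- the Bool threshold test, as a function of a cluster id
def pvOkB (cs : PySem.Set String) (merged : List (PySem.Set String)) (i : Nat) : Bool :=
  decide (max 1 (min (merged.getD i PySem.Set.empty).length cs.length / 2)
          ≤ (PySem.Set.inter (merged.getD i PySem.Set.empty) cs).length)

-- index invariant: postings of e are exactly the ids of clusters containing e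
def pvInv (merged : List (PySem.Set String)) (idx : PySem.Dict String (List Nat)) : Prop :=
  ∀ e i, i ∈ idx.getD e [] ↔ (i < merged.length ∧ e ∈ merged.getD i PySem.Set.empty)

theorem pvMergeFirst_eq (cs : PySem.Set String) (merged : List (PySem.Set String)) :
    pvMergeFirst cs merged =
      ((List.range merged.length).find? (pvOkB cs merged)).map
        (fun i => merged.set i (PySem.Set.update (merged.getD i PySem.Set.empty) cs)) := by
  induction merged with
  | nil => simp [pvMergeFirst]
  | cons s rest ih =>
    rw [pvMergeFirst, List.length_cons, List.range_succ_eq_map, List.find?_cons]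
    by_cases h : max 1 (min s.length cs.length / 2) ≤ (PySem.Set.inter s cs).length
    · have h0 : pvOkB cs (s :: rest) 0 = true := by simp [pvOkB, h]
      simp [h, h0, PySem.Set.update]
    · have h0 : pvOkB cs (s :: rest) 0 = false := by simp [pvOkB, h]
      rw [if_neg h, h0]
      simp only [Bool.false_eq_true, if_false]
      rw [ih, List.find?_map]
      have hcomp : (pvOkB cs (s :: rest)) ∘ (fun i => i + 1) = pvOkB cs rest := by
        funext i; simp [pvOkB, Function.comp]
      rw [hcomp]
      cases hf : (List.range rest.length).find? (pvOkB cs rest) <;> simp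

theorem pvMatchIn_eq (cs : PySem.Set String) (merged : List (PySem.Set String)) (l : List Nat) :
    pvMatchIn cs merged l = l.find? (pvOkB cs merged) := by
  induction l with
  | nil => simp [pvMatchIn]
  | cons i rest ih =>
    simp only [pvMatchIn]
    by_cases h : max 1 (min (merged.getD i PySem.Set.empty).length cs.length / 2)
        ≤ (PySem.Set.inter (merged.getD i PySem.Set.empty) cs).length
    · rw [if_pos h, List.find?_cons_of_pos (by unfold pvOkB; exact decide_eq_true h)]
    · rw [if_neg h, List.find?_cons_of_neg (by unfold pvOkB; rw [decide_eq_false h]; simp), ih]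

-- find? on a strictly increasing list is determined by the qualifying members
theorem pvFind?_sorted_char (p : Nat → Bool) (l : List Nat) (h : l.Pairwise (· < ·)) (j : Nat) :
    l.find? p = some j ↔ (j ∈ l ∧ p j = true ∧ ∀ k ∈ l, p k = true → j ≤ k) := by
  induction l with
  | nil => simp
  | cons a t ih =>
    rcases List.pairwise_cons.mp h with ⟨ha, ht⟩
    rw [List.find?_cons]
    cases hpa : p a with
    | true =>
      simp only [if_pos rfl]
      constructor
      · rintro h'; cases h'
        exact ⟨List.mem_cons_self, hpa, by
          intro k hk _; rcases List.mem_cons.mp hk with rfl | hk'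
          · exact le_refl _
          · exact le_of_lt (ha k hk')⟩
      · rintro ⟨hj, hpj, hmin⟩
        rcases List.mem_cons.mp hj with rfl | hj'
        · rfl
        · have h1 := hmin a List.mem_cons_self hpa
          have h2 := ha j hj'
          omega
    | false =>
      simp only [Bool.false_eq_true, if_false]
      rw [ih ht]
      constructor
      · rintro ⟨hj, hpj, hmin⟩
        exact ⟨List.mem_cons_of_mem _ hj, hpj, by
          intro k hk hpk
          rcases List.mem_cons.mp hk with rfl | hk'
          · rw [hpa] at hpk; cases hpk
          · exact hmin k hk' hpk⟩
      · rintro ⟨hj, hpj, hmin⟩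
        rcases List.mem_cons.mp hj with rfl | hj'
        · rw [hpa] at hpj; cases hpj
        · exact ⟨hj', hpj, fun k hk hpk => hmin k (List.mem_cons_of_mem _ hk) hpk⟩

theorem pvFind?_sorted_eq (p : Nat → Bool) (l1 l2 : List Nat)
    (h1 : l1.Pairwise (· < ·)) (h2 : l2.Pairwise (· < ·))
    (hmem : ∀ i, p i = true → (i ∈ l1 ↔ i ∈ l2)) : l1.find? p = l2.find? p := by
  cases hf : l1.find? p with
  | none =>
    rw [List.find?_eq_none] at hf
    symm; rw [List.find?_eq_none]
    intro x hx hpx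
    exact hf x ((hmem x hpx).mpr hx) hpx
  | some j =>
    rcases (pvFind?_sorted_char p l1 h1 j).mp hf with ⟨hj, hpj, hmin⟩
    symm
    rw [pvFind?_sorted_char p l2 h2 j]
    exact ⟨(hmem j hpj).mp hj, hpj, fun k hk hpk => hmin k ((hmem k hpk).mpr hk) hpk⟩

-- sorted of a Nodup Nat list is strictly increasing
theorem pvSorted_lt_of_nodup (l : List Nat) (h : l.Nodup) :
    (PySem.List.sorted l (fun x => x) false).Pairwise (· < ·) := by
  have hle : (PySem.List.sorted l (fun x => x) false).Pairwise (fun a b => a ≤ b) := by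
    have := PySem.List.sorted_pairwise (xs := l) (key := fun x => x)
    exact this.imp (fun hab => hab)
  have hnd : (PySem.List.sorted l (fun x => x) false).Nodup :=
    (PySem.List.sorted_perm (xs := l) (key := fun x => x) (rev := false)).nodup_iff.mpr h
  exact (hle.and hnd).imp (fun ⟨hab, hne⟩ => lt_of_le_of_ne hab hne)

-- candidate accumulation: membership and Nodup
theorem pvCand_mem (cs : List String) (idx : PySem.Dict String (List Nat)) (j : Nat) :
    j ∈ cs.foldl (fun c e => PySem.Set.update c (idx.getD e [])) PySem.Set.empty ↔
      ∃ e ∈ cs, j ∈ idx.getD e [] := by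
  suffices h : ∀ (c : PySem.Set Nat),
      j ∈ cs.foldl (fun c e => PySem.Set.update c (idx.getD e [])) c ↔
        j ∈ c ∨ ∃ e ∈ cs, j ∈ idx.getD e [] by
    rw [h PySem.Set.empty]; simp [PySem.Set.empty]
  induction cs with
  | nil => simp
  | cons a t ih =>
    intro c
    rw [List.foldl_cons, ih]
    rw [PySem.Set.mem_update]
    constructor
    · rintro (⟨hc | he⟩ | ⟨e, he, hj⟩)
      · exact Or.inl hc
      · exact Or.inr ⟨a, List.mem_cons_self, he⟩
      · exact Or.inr ⟨e, List.mem_cons_of_mem _ he, hj⟩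
    · rintro (hc | ⟨e, he, hj⟩)
      · exact Or.inl (Or.inl hc)
      · rcases List.mem_cons.mp he with rfl | he'
        · exact Or.inl (Or.inr hj)
        · exact Or.inr ⟨e, he', hj⟩

theorem pvCand_nodup (cs : List String) (idx : PySem.Dict String (List Nat)) :
    (cs.foldl (fun c e => PySem.Set.update c (idx.getD e [])) PySem.Set.empty).Nodup := by
  suffices h : ∀ (c : PySem.Set Nat), c.Nodup →
      (cs.foldl (fun c e => PySem.Set.update c (idx.getD e [])) c).Nodup by
    exact h PySem.Set.empty (by simp [PySem.Set.empty])
  induction cs with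
  | nil => intro c hc; simpa using hc
  | cons a t ih =>
    intro c hc
    rw [List.foldl_cons]
    exact ih _ (PySem.Set.nodup_update _ _ hc)

-- first component of the absorb fold is the plain Set.add fold
theorem pvAbsorb_fst (l : List String) (i : Nat) :
    ∀ (s : PySem.Set String) (idx : PySem.Dict String (List Nat)),
      (l.foldl (pvAbsorbF i) (s, idx)).1 = l.foldl PySem.Set.add s := by
  induction l with
  | nil => intro s idx; rfl
  | cons a t ih =>
    intro s idx
    rw [List.foldl_cons, List.foldl_cons]
    by_cases hc : PySem.Set.contains s a = true
    · have hm : a ∈ s := (PySem.Set.contains_iff _ _).mp hc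
      rw [pvAbsorbF, if_pos hc, PySem.Set.add_of_mem hm]
      exact ih s idx
    · have hm : a ∉ s := fun h => hc ((PySem.Set.contains_iff _ _).mpr h)
      rw [pvAbsorbF, if_neg hc, PySem.Set.add_of_not_mem hm]
      exact ih _ _

-- postings after the absorb fold
theorem pvAbsorb_getD (l : List String) (i : Nat) :
    ∀ (s : PySem.Set String) (idx : PySem.Dict String (List Nat)) (e : String),
      ((l.foldl (pvAbsorbF i) (s, idx)).2).getD e [] =
        if e ∈ l ∧ e ∉ s then idx.getD e [] ++ [i] else idx.getD e [] := by
  induction l with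
  | nil => intro s idx e; simp
  | cons a t ih =>
    intro s idx e
    rw [List.foldl_cons]
    by_cases hc : PySem.Set.contains s a = true
    · have hma : a ∈ s := (PySem.Set.contains_iff _ _).mp hc
      rw [pvAbsorbF, if_pos hc, ih]
      by_cases he : e ∈ t ∧ e ∉ s
      · rw [if_pos he, if_pos ⟨List.mem_cons_of_mem _ he.1, he.2⟩]
      · rw [if_neg he, if_neg (by
          rintro ⟨hm, hns⟩
          rcases List.mem_cons.mp hm with rfl | hm'
          · exact hns hma
          · exact he ⟨hm', hns⟩)]
    · have hma : a ∉ s := fun h => hc ((PySem.Set.contains_iff _ _).mpr h)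
      rw [pvAbsorbF, if_neg hc, ih]
      rw [PySem.Dict.getD_insert]
      by_cases hea : e = a
      · subst hea
        have h1 : ¬ (e ∈ t ∧ e ∉ s ++ [e]) := by simp
        rw [if_neg h1, if_pos rfl, if_pos ⟨List.mem_cons_self, hma⟩]
      · rw [if_neg hea]
        by_cases he : e ∈ t ∧ e ∉ s
        · have : e ∈ t ∧ e ∉ s ++ [a] := ⟨he.1, by
            intro hm; rcases List.mem_append.mp hm with h | h
            · exact he.2 h
            · exact hea (List.mem_singleton.mp h)⟩
          rw [if_pos this, if_pos ⟨List.mem_cons_of_mem _ he.1, he.2⟩]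
        · have : ¬ (e ∈ t ∧ e ∉ s ++ [a]) := by
            rintro ⟨hm, hns⟩
            exact he ⟨hm, fun h => hns (List.mem_append.mpr (Or.inl h))⟩
          rw [if_neg this, if_neg (by
            rintro ⟨hm, hns⟩
            rcases List.mem_cons.mp hm with rfl | hm'
            · exact hea rfl
            · exact he ⟨hm', hns⟩)]

theorem pvOk_ge_one (cs s : PySem.Set String)
    (h : max 1 (min s.length cs.length / 2) ≤ (PySem.Set.inter s cs).length) :
    ∃ e, e ∈ s ∧ e ∈ cs := by
  have h1 : 1 ≤ (PySem.Set.inter s cs).length := le_trans (le_max_left _ _) h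
  rcases List.exists_mem_of_length_pos (l := PySem.Set.inter s cs) (by omega) with ⟨e, he⟩
  refine ⟨e, ?_⟩
  simpa [PySem.Set.mem_inter] using he

-- one chain step: the merged lists agree and the invariant is preserved
theorem pvAbsorb_fst' (cs : PySem.Set String) (i : Nat) (s : PySem.Set String)
    (idx : PySem.Dict String (List Nat)) :
    (pvAbsorb cs i s idx).1 = PySem.Set.update s cs := by
  rw [pvAbsorb, pvAbsorb_fst]; rfl

theorem pvAbsorb_getD' (cs : PySem.Set String) (i : Nat) (s : PySem.Set String)
    (idx : PySem.Dict String (List Nat)) (e : String) :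
    ((pvAbsorb cs i s idx).2).getD e [] =
      if e ∈ cs ∧ e ∉ s then idx.getD e [] ++ [i] else idx.getD e [] := by
  rw [pvAbsorb, pvAbsorb_getD]

theorem pvStep_eq (merged : List (PySem.Set String)) (idx : PySem.Dict String (List Nat))
    (chain : List String) (hInv : pvInv merged idx) :
    (pvStepB (merged, idx) chain).1 = pvStepA merged chain ∧
      pvInv (pvStepB (merged, idx) chain).1 (pvStepB (merged, idx) chain).2 := by
  have hcsnd : (PySem.Set.ofList chain).Nodup := PySem.Set.nodup_ofList chain
  -- the two scans agree
  have hfind : (PySem.List.sorted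
        ((PySem.Set.ofList chain).foldl (fun c e => PySem.Set.update c (idx.getD e []))
          PySem.Set.empty) (fun x => x) false).find? (pvOkB (PySem.Set.ofList chain) merged)
      = (List.range merged.length).find? (pvOkB (PySem.Set.ofList chain) merged) := by
    apply pvFind?_sorted_eq
    · exact pvSorted_lt_of_nodup _ (pvCand_nodup _ idx)
    · exact List.pairwise_lt_range
    · intro j hpj
      rw [PySem.List.mem_sorted, List.mem_range]
      constructor
      · intro hj
        rcases (pvCand_mem _ idx j).mp hj with ⟨e, _, hj'⟩
        exact ((hInv e j).mp hj').1
      · intro hj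
        have hok : max 1 (min (merged.getD j PySem.Set.empty).length
              (PySem.Set.ofList chain).length / 2)
            ≤ (PySem.Set.inter (merged.getD j PySem.Set.empty) (PySem.Set.ofList chain)).length :=
          of_decide_eq_true hpj
        rcases pvOk_ge_one _ _ hok with ⟨e, hes, hec⟩
        exact (pvCand_mem _ idx j).mpr ⟨e, hec, (hInv e j).mpr ⟨hj, hes⟩⟩
  rw [pvStepB, pvStepA, pvMatchIn_eq, hfind, pvMergeFirst_eq]
  cases hf : (List.range merged.length).find? (pvOkB (PySem.Set.ofList chain) merged) with
  | none =>
    simp only [Option.map_none]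
    have hfst : (pvAbsorb (PySem.Set.ofList chain) merged.length PySem.Set.empty idx).1
        = PySem.Set.ofList chain := by
      rw [pvAbsorb_fst']
      have hemp : (PySem.Set.empty : PySem.Set String) = [] := rfl
      rw [hemp, PySem.Set.update_nil_left, PySem.Set.ofList_ofList]
    constructor
    · rw [hfst]
    · -- invariant for the appended cluster
      intro e j
      rw [hfst, pvAbsorb_getD']
      have hmem : ∀ k, k ∈ idx.getD e [] → k < merged.length := fun k hk => ((hInv e k).mp hk).1
      have hget : ∀ (k : Nat), (merged ++ [PySem.Set.ofList chain]).getD k PySem.Set.empty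
          = if hk : k < merged.length then merged.getD k PySem.Set.empty
            else if k = merged.length then PySem.Set.ofList chain else PySem.Set.empty := by
        intro k
        rcases lt_trichotomy k merged.length with hk | hk | hk
        · rw [dif_pos hk, List.getD_eq_getElem?_getD, List.getElem?_append_left hk,
            ← List.getD_eq_getElem?_getD]
        · subst hk
          rw [dif_neg (lt_irrefl _), if_pos rfl, List.getD_eq_getElem?_getD,
            List.getElem?_append_right (le_refl _)]
          simp
        · rw [dif_neg (by omega), if_neg (by omega), List.getD_eq_getElem?_getD,
            List.getElem?_eq_none (by simp; omega)]
          rfl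
      by_cases hec : e ∈ PySem.Set.ofList chain
      · rw [if_pos ⟨hec, List.not_mem_nil⟩]
        rw [List.mem_append, List.mem_singleton, hInv e j, hget j, List.length_append,
          List.length_singleton]
        by_cases hj : j < merged.length
        · rw [dif_pos hj]
          constructor
          · rintro (⟨_, h⟩ | rfl)
            · exact ⟨by omega, h⟩
            · exact absurd hj (lt_irrefl _)
          · rintro ⟨_, h⟩
            exact Or.inl ⟨hj, h⟩
        · by_cases hj' : j = merged.length
          · subst hj'
            rw [dif_neg hj, if_pos rfl]
            constructor
            · intro _; exact ⟨by omega, hec⟩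
            · intro _; exact Or.inr rfl
          · rw [dif_neg hj, if_neg hj']
            constructor
            · rintro (⟨h, _⟩ | rfl)
              · exact absurd h hj
              · exact absurd rfl hj'
            · rintro ⟨_, h⟩
              exact absurd hj' (by omega)
      · rw [if_neg (by rintro ⟨h, _⟩; exact hec h)]
        rw [hInv e j, hget j, List.length_append, List.length_singleton]
        by_cases hj : j < merged.length
        · rw [dif_pos hj]
          exact ⟨fun ⟨_, h⟩ => ⟨by omega, h⟩, fun ⟨_, h⟩ => ⟨hj, h⟩⟩
        · by_cases hj' : j = merged.length
          · subst hj'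
            rw [dif_neg hj, if_pos rfl]
            exact ⟨fun ⟨h, _⟩ => absurd h hj, fun ⟨_, h⟩ => absurd h hec⟩
          · rw [dif_neg hj, if_neg hj']
            exact ⟨fun ⟨h, _⟩ => by omega, fun ⟨_, h⟩ => absurd h (List.not_mem_nil)⟩
  | some i =>
    have hi : i < merged.length := by
      have := List.mem_range.mp (List.mem_of_find?_eq_some hf)
      exact this
    simp only [Option.map_some]
    have hfst : (pvAbsorb (PySem.Set.ofList chain) i (merged.getD i PySem.Set.empty) idx).1
        = PySem.Set.update (merged.getD i PySem.Set.empty) (PySem.Set.ofList chain) :=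
      pvAbsorb_fst' _ _ _ _
    constructor
    · rw [hfst]
    · intro e j
      rw [hfst, pvAbsorb_getD']
      have hget : ∀ (k : Nat), ((merged.set i
            (PySem.Set.update (merged.getD i PySem.Set.empty) (PySem.Set.ofList chain))).getD k
            PySem.Set.empty)
          = if k = i then PySem.Set.update (merged.getD i PySem.Set.empty) (PySem.Set.ofList chain)
            else merged.getD k PySem.Set.empty := by
        intro k
        by_cases hk : k = i
        · subst hk
          rw [if_pos rfl, List.getD_eq_getElem?_getD, List.getElem?_set_self (by omega)]
          rfl
        · rw [if_neg hk, List.getD_eq_getElem?_getD,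
            List.getElem?_set_ne (by omega), ← List.getD_eq_getElem?_getD]
      rw [List.length_set, hget j]
      by_cases hcase : e ∈ PySem.Set.ofList chain ∧ e ∉ merged.getD i PySem.Set.empty
      · rw [if_pos hcase]
        rw [List.mem_append, List.mem_singleton, hInv e j]
        by_cases hj : j = i
        · subst hj
          rw [if_pos rfl]
          constructor
          · intro _; exact ⟨hi, (PySem.Set.mem_update _ _ _).mpr (Or.inr hcase.1)⟩
          · intro _; exact Or.inr rfl
        · rw [if_neg hj]
          constructor
          · rintro (h | h)
            · exact h
            · exact absurd h hj
          · exact fun h => Or.inl h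
      · rw [if_neg hcase]
        rw [hInv e j]
        by_cases hj : j = i
        · subst hj
          rw [if_pos rfl]
          constructor
          · rintro ⟨_, h⟩
            exact ⟨hi, (PySem.Set.mem_update _ _ _).mpr (Or.inl h)⟩
          · rintro ⟨_, h⟩
            rcases (PySem.Set.mem_update _ _ _).mp h with h' | h'
            · exact ⟨hi, h'⟩
            · by_cases hs : e ∈ merged.getD j PySem.Set.empty
              · exact ⟨hi, hs⟩
              · exact absurd ⟨h', hs⟩ hcase
        · rw [if_neg hj]

-- fold over all chains
theorem pvFold_eq (chains : List (List String)) :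
    ∀ (merged : List (PySem.Set String)) (idx : PySem.Dict String (List Nat)),
      pvInv merged idx →
      (chains.foldl pvStepB (merged, idx)).1 = chains.foldl pvStepA merged ∧
        pvInv (chains.foldl pvStepB (merged, idx)).1 (chains.foldl pvStepB (merged, idx)).2 := by
  induction chains with
  | nil => intro merged idx h; exact ⟨rfl, h⟩
  | cons c t ih =>
    intro merged idx h
    rcases pvStep_eq merged idx c h with ⟨h1, h2⟩
    rw [List.foldl_cons, List.foldl_cons]
    have := ih (pvStepB (merged, idx) c).1 (pvStepB (merged, idx) c).2 h2
    rw [← h1]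
    exact this

-- ===== VERDICT (by name: the statement is the Claim_ definition above) =====
theorem merge_overlapping_subchains_spec : Claim_equal_merge_overlapping_subchains := by
  intro subchains _
  unfold Spec_merge_overlapping_subchains
  simp only [merge_overlapping_subchains, merge_overlapping_subchains_alt]
  have h0 : pvInv [] PySem.Dict.empty := by
    intro e i; simp [PySem.Dict.getD_empty]
  have := (pvFold_eq subchains [] PySem.Dict.empty h0).1
  rw [this]
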